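-- pv_equiv track=rewrite | github.com/matiaszanolli/sega-vr-disasm | tools/translate_68k_modules.py | format_regmask
-- ===== SOURCE A (Python) =====
-- def format_regmask(mask):
--     """Format a MOVEM register mask as a register list string."""
--     regs = []
--     # Bits 0-7: D0-D7, Bits 8-15: A0-A7
--     for i in range(8):
--         if mask & (1 << i):
--             regs.append(f"d{i}")
--     for i in range(8):
--         if mask & (1 << (i + 8)):
--             regs.append(f"a{i}")
--
--     if not regs:
--         return "#$0000"  # Empty mask (shouldn't happen)
--
--     # Try to compress ranges: d0-d3/a0/a6
--     return compress_reglist(regs)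
--
-- def compress_reglist(regs):
--     """Compress register list: ['d0','d1','d2','d3','a0','a6'] → 'd0-d3/a0/a6'"""
--     groups = []
--     d_regs = sorted([int(r[1]) for r in regs if r[0] == 'd'])
--     a_regs = sorted([int(r[1]) for r in regs if r[0] == 'a'])
--
--     for prefix, nums in [('d', d_regs), ('a', a_regs)]:
--         i = 0
--         while i < len(nums):
--             start = nums[i]
--             end = start
--             while i + 1 < len(nums) and nums[i + 1] == end + 1:
--                 i += 1
--                 end = nums[i]
--             if start == end:
--                 groups.append(f"{prefix}{start}")
--             else:
--                 groups.append(f"{prefix}{start}-{prefix}{end}")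
--             i += 1
--
--     return '/'.join(groups)
-- ===== SOURCE B (Python) =====
-- def format_regmask(mask):
--     """Format a MOVEM register mask as a register list string."""
--     groups = []
--     for prefix, base in (('d', 0), ('a', 8)):
--         i = 0
--         while i < 8:
--             if (mask >> (base + i)) & 1:
--                 start = i
--                 while i + 1 < 8 and (mask >> (base + i + 1)) & 1:
--                     i += 1
--                 if start == i:
--                     groups.append(f"{prefix}{start}")
--                 else:
--                     groups.append(f"{prefix}{start}-{prefix}{i}")
--             i += 1
--     return '/'.join(groups) if groups else "#$0000"
-- ===== Notes on version B (the rewrite author's own statement) =====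
-- stated objective: simpler
-- what changed: B scans the low mask bits directly, emitting each maximal run of set bits as a group in one pass per register class, instead of A's pipeline of building a string list, filtering it back by prefix, re-parsing the digits to ints, sorting them, and compressing runs in a second loop.
import Mathlib
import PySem

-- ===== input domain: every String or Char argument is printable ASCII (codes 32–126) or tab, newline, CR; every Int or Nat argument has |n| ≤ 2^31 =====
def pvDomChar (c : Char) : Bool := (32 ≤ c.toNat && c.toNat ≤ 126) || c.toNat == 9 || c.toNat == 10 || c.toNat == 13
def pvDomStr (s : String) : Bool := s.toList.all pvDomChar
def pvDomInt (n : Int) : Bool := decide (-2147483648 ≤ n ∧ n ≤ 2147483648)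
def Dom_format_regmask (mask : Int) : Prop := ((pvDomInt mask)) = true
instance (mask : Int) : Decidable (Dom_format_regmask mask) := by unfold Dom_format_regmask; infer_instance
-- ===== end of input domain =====

-- B formats a MOVEM mask by scanning the low mask bits directly, emitting maximal runs of set bits in one
-- pass per register class, instead of A's build-list / filter / re-parse / sort / compress pipeline.

-- ===== PORT A =====

-- r[i] as a one-character string; out of range Python raises IndexError (unreachable here) — "" then
def pvCharAt (r : String) (i : Int) : String :=
  match PySem.Str.pyGet? r i with
  | some c => String.ofList [c]
  | none => ""

-- inner `while i + 1 < len(nums) and nums[i + 1] == end + 1`: consume the run, return (end, rest)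
def pvEatRun (e : Int) : List Int → Int × List Int
  | [] => (e, [])
  | m :: rest => if m = e + 1 then pvEatRun m rest else (e, m :: rest)

-- outer `while i < len(nums)` of compress_reglist for one (prefix, nums) pair;
-- fuel only makes the recursion structural: fuel = nums.length runs the loop to the end
def pvRunLoopGo (pre : String) : Nat → List Int → List String
  | 0, _ => []
  | _, [] => []
  | fuel + 1, n :: rest =>
    let er := pvEatRun n rest
    (if n = er.1 then pre ++ PySem.Int.toStr n
     else pre ++ PySem.Int.toStr n ++ "-" ++ pre ++ PySem.Int.toStr er.1)
      :: pvRunLoopGo pre fuel er.2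

def pvRunLoop (pre : String) (nums : List Int) : List String :=
  pvRunLoopGo pre nums.length nums

def compress_reglist (regs : List String) : String :=
  -- int(r[1]): a ValueError is unreachable from format_regmask — 0 there
  let d_regs := PySem.List.sorted
    ((regs.filter (fun r => pvCharAt r 0 == "d")).map
      (fun r => (PySem.Int.ofStr? (pvCharAt r 1)).getD 0)) (fun x => x)
  let a_regs := PySem.List.sorted
    ((regs.filter (fun r => pvCharAt r 0 == "a")).map
      (fun r => (PySem.Int.ofStr? (pvCharAt r 1)).getD 0)) (fun x => x)
  let groups := [("d", d_regs), ("a", a_regs)].foldl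
    (fun gs pr => gs ++ pvRunLoop pr.1 pr.2) []
  PySem.Str.join "/" groups

def format_regmask (mask : Int) : String :=
  let regs : List String := (PySem.List.pyRange 0 8 1).foldl
    (fun acc i => if PySem.Int.band mask ((1:Int) <<< i) ≠ 0
                  then acc ++ ["d" ++ PySem.Int.toStr i] else acc) []
  let regs := (PySem.List.pyRange 0 8 1).foldl
    (fun acc i => if PySem.Int.band mask ((1:Int) <<< (i + 8)) ≠ 0
                  then acc ++ ["a" ++ PySem.Int.toStr i] else acc) regs
  if regs = [] then "#$0000"
  else compress_reglist regs

-- ===== PORT B =====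

-- inner `while i + 1 < 8 and (mask >> (base + i + 1)) & 1`: the run's end position;
-- fuel only makes the recursion structural (the loop advances i < 8, so fuel = 8 is enough)
def pvRunEndGo (mask : Int) (base : Nat) : Nat → Nat → Nat
  | 0, i => i
  | fuel + 1, i =>
    if i + 1 < 8 ∧ PySem.Int.band (mask >>> (base + i + 1)) 1 ≠ 0
    then pvRunEndGo mask base fuel (i + 1) else i

-- outer `while i < 8` for one (prefix, base) class, fuel = 8 likewise
def pvScanGo (mask : Int) (pre : String) (base : Nat) : Nat → Nat → List String
  | 0, _ => []
  | fuel + 1, i =>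
    if i < 8 then
      if PySem.Int.band (mask >>> (base + i)) 1 ≠ 0 then
        let e := pvRunEndGo mask base 8 i
        (if i = e then pre ++ PySem.Int.toStr i
         else pre ++ PySem.Int.toStr i ++ "-" ++ pre ++ PySem.Int.toStr e)
          :: pvScanGo mask pre base fuel (e + 1)
      else pvScanGo mask pre base fuel (i + 1)
    else []

def format_regmask_alt (mask : Int) : String :=
  let groups := pvScanGo mask "d" 0 8 0 ++ pvScanGo mask "a" 8 8 0
  if groups = [] then "#$0000" else PySem.Str.join "/" groups

-- ===== PRECONDITION & SPEC =====
def Spec_format_regmask (mask : Int) (out : String) : Prop := out = format_regmask_alt mask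
instance (mask : Int) (out : String) : Decidable (Spec_format_regmask mask out) := by unfold Spec_format_regmask; infer_instance

-- ===== CLAIM (what is proved, stated in full; the proofs are below) =====
def Claim_equal_format_regmask : Prop := ∀ (mask : Int), Dom_format_regmask mask → Spec_format_regmask mask (format_regmask mask)

-- ===== LEMMAS AND PROOFS =====

-- the low 16 bits of the mask (Python-mod, hence the Int emod) and their two 8-bit halves
def pvNn (mask : Int) : Nat := (mask % 65536).toNat
def pvD (mask : Int) : Nat := pvNn mask % 256
def pvA (mask : Int) : Nat := pvNn mask / 256

-- the k-th bit of the mask, read the way A reads it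
theorem pv_bandbit (a : Int) (k : Nat) (hk : k < 16) :
    (PySem.Int.band a (((2^k : Nat) : Int)) ≠ 0) ↔ (pvNn a).testBit k = true := by
  have h65 : (65536:Nat) = 2^16 := by norm_num
  have hp : 0 < 2^k := Nat.two_pow_pos k
  unfold pvNn
  by_cases ha : 0 ≤ a
  · obtain ⟨m, rfl⟩ := Int.eq_ofNat_of_zero_le ha
    rw [PySem.Int.band_natCast]
    have h1 : (((m:Int)) % 65536).toNat = m % 65536 := by omega
    rw [Nat.and_two_pow, h1, h65, Nat.testBit_mod_two_pow]
    simp only [hk, decide_true, Bool.true_and]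
    rcases h : m.testBit k <;> simp
  · set m : Nat := (-a - 1).toNat with hm
    rw [PySem.Int.band]
    rw [if_neg ha, if_pos (by positivity : (0:Int) ≤ ((2^k : Nat) : Int))]
    have h2 : ((((2^k : Nat)):Int)).toNat = 2^k := Int.toNat_natCast _
    have h3 : (-a - 1).toNat = m := rfl
    rw [h2, h3, Nat.two_pow_and]
    have h4 : (a % 65536).toNat = 65535 - m % 65536 := by omega
    have h5 : 65535 - m % 65536 = 2^16 - (m % 65536 + 1) := by omega
    rw [h4, h5, Nat.testBit_two_pow_sub_succ (by omega), h65, Nat.testBit_mod_two_pow]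
    simp only [hk, decide_true, Bool.true_and]
    rcases h : m.testBit k <;> simp

-- the k-th bit of the mask, read the way B reads it
theorem pv_bandbit2 (a : Int) (k : Nat) (hk : k < 16) :
    (PySem.Int.band (a >>> k) 1 ≠ 0) ↔ (pvNn a).testBit k = true := by
  unfold pvNn
  rw [PySem.Int.band_one, PySem.Int.mod_eq_emod_of_pos (by norm_num), Int.shiftRight_eq_div_pow,
      Nat.testBit_eq_decide_div_mod_eq]
  interval_cases k <;> · norm_num; omega

theorem pv_testBit_d (mask : Int) (j : Nat) (hj : j < 8) :
    (pvNn mask).testBit j = (pvD mask).testBit j := by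
  unfold pvD
  rw [show (256:Nat) = 2^8 by norm_num, Nat.testBit_mod_two_pow]
  simp [hj]

theorem pv_testBit_a (mask : Int) (j : Nat) :
    (pvNn mask).testBit (8 + j) = (pvA mask).testBit j := by
  unfold pvA
  rw [show pvNn mask / 256 = pvNn mask >>> 8 by rw [Nat.shiftRight_eq_div_pow],
      Nat.testBit_shiftRight]

-- A's register-building loops, per byte
def pvRegs (pre : String) (b : Nat) : List String :=
  ((PySem.List.pyRange 0 8 1).filter (fun i => b.testBit i.toNat)).map
    (fun i => pre ++ PySem.Int.toStr i)

def pvFA (d a : Nat) : String :=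
  let regs := pvRegs "d" d ++ pvRegs "a" a
  if regs = [] then "#$0000" else compress_reglist regs

-- B's scan, per byte
def pvRunEndNGo (b : Nat) : Nat → Nat → Nat
  | 0, i => i
  | fuel + 1, i =>
    if i + 1 < 8 ∧ b.testBit (i + 1) then pvRunEndNGo b fuel (i + 1) else i

def pvScanN (b : Nat) (pre : String) : Nat → Nat → List String
  | 0, _ => []
  | fuel + 1, i =>
    if i < 8 then
      if b.testBit i then
        let e := pvRunEndNGo b 8 i
        (if i = e then pre ++ PySem.Int.toStr i
         else pre ++ PySem.Int.toStr i ++ "-" ++ pre ++ PySem.Int.toStr e)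
          :: pvScanN b pre fuel (e + 1)
      else pvScanN b pre fuel (i + 1)
    else []

def pvFB (d a : Nat) : String :=
  let gs := pvScanN d "d" 8 0 ++ pvScanN a "a" 8 0
  if gs = [] then "#$0000" else PySem.Str.join "/" gs

-- B's two loops only look at bits base+j, j < 8: replace the Int bit test by the byte's testBit
theorem pv_runEnd_eqN (mask : Int) (base b : Nat)
    (hbit : ∀ j, j < 8 → ((PySem.Int.band (mask >>> (base + j)) 1 ≠ 0) ↔ b.testBit j = true))
    (fuel i : Nat) : pvRunEndGo mask base fuel i = pvRunEndNGo b fuel i := by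
  induction fuel generalizing i with
  | zero => rfl
  | succ fuel ih =>
    simp only [pvRunEndGo, pvRunEndNGo]
    by_cases h8 : i + 1 < 8
    · have hb := hbit (i + 1) h8
      by_cases hc : PySem.Int.band (mask >>> (base + (i + 1))) 1 ≠ 0
      · rw [if_pos ⟨h8, by rwa [show base + i + 1 = base + (i+1) by omega]⟩,
            if_pos ⟨h8, hb.mp hc⟩, ih]
      · rw [if_neg (by rw [show base + i + 1 = base + (i+1) by omega]; tauto),
            if_neg (by rw [← hb] at *; tauto)]
    · rw [if_neg (by tauto), if_neg (by tauto)]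

theorem pv_scan_eqN (mask : Int) (pre : String) (base b : Nat)
    (hbit : ∀ j, j < 8 → ((PySem.Int.band (mask >>> (base + j)) 1 ≠ 0) ↔ b.testBit j = true))
    (fuel i : Nat) : pvScanGo mask pre base fuel i = pvScanN b pre fuel i := by
  induction fuel generalizing i with
  | zero => rfl
  | succ fuel ih =>
    simp only [pvScanGo, pvScanN]
    by_cases h8 : i < 8
    · rw [if_pos h8, if_pos h8]
      have hb := hbit i h8
      by_cases hc : PySem.Int.band (mask >>> (base + i)) 1 ≠ 0
      · rw [if_pos hc, if_pos (hb.mp hc), pv_runEnd_eqN mask base b hbit, ih]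
      · rw [if_neg hc, if_neg (by rw [← hb] at *; tauto), ih]
    · rw [if_neg h8, if_neg h8]

theorem pv_B_form (mask : Int) : format_regmask_alt mask = pvFB (pvD mask) (pvA mask) := by
  unfold format_regmask_alt pvFB
  rw [pv_scan_eqN mask "d" 0 (pvD mask)
        (fun j hj => by
          rw [Nat.zero_add, ← pv_testBit_d mask j hj]
          exact pv_bandbit2 mask j (by omega)),
      pv_scan_eqN mask "a" 8 (pvA mask)
        (fun j hj => by
          rw [← pv_testBit_a mask j]
          exact pv_bandbit2 mask (8 + j) (by omega))]

theorem pv_A_form (mask : Int) : format_regmask mask = pvFA (pvD mask) (pvA mask) := by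
  simp only [format_regmask, pvFA, pvRegs]
  rw [PySem.List.foldl_append_ite (p := fun i : Int => PySem.Int.band mask ((1:Int) <<< i) ≠ 0),
      PySem.List.foldl_append_ite (p := fun i : Int => PySem.Int.band mask ((1:Int) <<< (i + 8)) ≠ 0),
      List.nil_append,
      List.filter_congr (p := fun i : Int => decide (PySem.Int.band mask ((1:Int) <<< i) ≠ 0))
        (q := fun i : Int => (pvD mask).testBit i.toNat)
        (fun i hi => by
          have hm := (PySem.List.mem_pyRange_one).mp hi
          have hk : i.toNat < 8 := by omega
          simp only []
          rw [show i = ((i.toNat : Nat) : Int) from by omega, Int.one_shiftLeft]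
          simp only [Int.toNat_natCast]
          exact (decide_eq_decide.mpr ((pv_bandbit mask i.toNat (by omega)).trans
            (by rw [pv_testBit_d mask i.toNat hk]))).trans Bool.decide_eq_true),
      List.filter_congr (p := fun i : Int => decide (PySem.Int.band mask ((1:Int) <<< (i + 8)) ≠ 0))
        (q := fun i : Int => (pvA mask).testBit i.toNat)
        (fun i hi => by
          have hm := (PySem.List.mem_pyRange_one).mp hi
          have hk : i.toNat < 8 := by omega
          simp only []
          rw [show i = ((i.toNat : Nat) : Int) from by omega,
              show ((i.toNat : Nat) : Int) + 8 = (((i.toNat + 8 : Nat)) : Int) from by push_cast; ring,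
              Int.one_shiftLeft]
          simp only [Int.toNat_natCast]
          exact (decide_eq_decide.mpr ((pv_bandbit mask (i.toNat + 8) (by omega)).trans
            (by rw [show i.toNat + 8 = 8 + i.toNat from by omega, pv_testBit_a mask i.toNat]))).trans
            Bool.decide_eq_true)]

-- the parse-back and sort A's compress_reglist performs, per byte
def pvParse (r : String) : Int := (PySem.Int.ofStr? (pvCharAt r 1)).getD 0
def pvNums (pre : String) (b : Nat) : List Int :=
  PySem.List.sorted ((pvRegs pre b).map pvParse) (fun x => x)

set_option maxRecDepth 40000 in
theorem pv_filter_dd : ∀ d < 256,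
    (pvRegs "d" d).filter (fun r => pvCharAt r 0 == "d") = pvRegs "d" d := by decide

set_option maxRecDepth 40000 in
theorem pv_filter_ad : ∀ a < 256,
    (pvRegs "a" a).filter (fun r => pvCharAt r 0 == "d") = [] := by decide

set_option maxRecDepth 40000 in
theorem pv_filter_da : ∀ d < 256,
    (pvRegs "d" d).filter (fun r => pvCharAt r 0 == "a") = [] := by decide

set_option maxRecDepth 40000 in
theorem pv_filter_aa : ∀ a < 256,
    (pvRegs "a" a).filter (fun r => pvCharAt r 0 == "a") = pvRegs "a" a := by decide

set_option maxRecDepth 40000 in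
theorem pv_key_d : ∀ d < 256, pvRunLoop "d" (pvNums "d" d) = pvScanN d "d" 8 0 := by decide

set_option maxRecDepth 40000 in
theorem pv_key_a : ∀ a < 256, pvRunLoop "a" (pvNums "a" a) = pvScanN a "a" 8 0 := by decide

set_option maxRecDepth 40000 in
theorem pv_empty_d : ∀ d < 256, (pvRegs "d" d = [] ↔ pvScanN d "d" 8 0 = []) := by decide

set_option maxRecDepth 40000 in
theorem pv_empty_a : ∀ a < 256, (pvRegs "a" a = [] ↔ pvScanN a "a" 8 0 = []) := by decide

theorem pv_FA_eq_FB (d a : Nat) (hd : d < 256) (ha : a < 256) : pvFA d a = pvFB d a := by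
  unfold pvFA pvFB
  have hsplit : compress_reglist (pvRegs "d" d ++ pvRegs "a" a) =
      PySem.Str.join "/" (pvRunLoop "d" (pvNums "d" d) ++ pvRunLoop "a" (pvNums "a" a)) := by
    unfold compress_reglist pvNums
    rw [List.filter_append, List.filter_append,
        pv_filter_dd d hd, pv_filter_ad a ha, pv_filter_da d hd, pv_filter_aa a ha,
        List.append_nil, List.nil_append]
    simp only [List.foldl, List.nil_append]
    rfl
  by_cases hcase : pvRegs "d" d = [] ∧ pvRegs "a" a = []
  · have e1 := (pv_empty_d d hd).mp hcase.1
    have e2 := (pv_empty_a a ha).mp hcase.2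
    rw [if_pos (by rw [hcase.1, hcase.2]; rfl), if_pos (by rw [e1, e2]; rfl)]
  · have key : ¬(pvScanN d "d" 8 0 = [] ∧ pvScanN a "a" 8 0 = []) := by
      rw [← pv_empty_d d hd, ← pv_empty_a a ha]; exact hcase
    rw [if_neg (fun h => hcase (List.append_eq_nil_iff.mp h)),
        if_neg (fun h => key (List.append_eq_nil_iff.mp h)),
        hsplit, pv_key_d d hd, pv_key_a a ha]

-- ===== VERDICT (by name: the statement is the Claim_ definition above) =====
theorem format_regmask_spec : Claim_equal_format_regmask := by
  intro mask _
  unfold Spec_format_regmask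
  rw [pv_A_form, pv_B_form]
  have hn : pvNn mask < 65536 := by unfold pvNn; omega
  exact pv_FA_eq_FB _ _ (by unfold pvD; omega) (by unfold pvA; omega)
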